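-- pv_equiv track=rewrite | github.com/mda-sha/pythonStudying | ArithmeticFormatter.py | sym_in_num
-- ===== SOURCE A (Python) =====
-- def sym_in_num(num):
--     n = num
--     s = 0
--     if num < 0:
--         num *= -1
--     while num > 0 and s < 5:
--         num = int(num / 10)
--         s += 1
--     if n < 0:
--         s += 1
--     return(s)
-- ===== SOURCE B (Python) =====
-- def sym_in_num(num):
--     a = abs(num)
--     s = sum(a > t for t in (0, 9, 99, 999, 9999))
--     return s + (1 if num < 0 else 0)
-- ===== Notes on version B (the rewrite author's own statement) =====
-- stated objective: simpler
-- what changed: Replaces the iterative divide-by-10 digit-peeling loop with a closed-form count of how many of the thresholds (0, 9, 99, 999, 9999) |num| exceeds, plus the sign increment.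
import Mathlib
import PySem

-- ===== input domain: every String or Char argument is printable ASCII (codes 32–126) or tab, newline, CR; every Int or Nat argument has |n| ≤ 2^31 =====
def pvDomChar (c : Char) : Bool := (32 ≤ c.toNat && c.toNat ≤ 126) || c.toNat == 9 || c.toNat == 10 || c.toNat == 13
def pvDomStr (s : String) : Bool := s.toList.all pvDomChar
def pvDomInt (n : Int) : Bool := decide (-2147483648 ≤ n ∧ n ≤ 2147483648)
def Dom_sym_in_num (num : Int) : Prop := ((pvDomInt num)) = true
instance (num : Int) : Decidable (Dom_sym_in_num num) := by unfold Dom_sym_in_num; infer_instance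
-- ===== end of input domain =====

-- B replaces A's iterative divide-by-10 digit-peeling loop with a closed-form count of
-- thresholds |num| exceeds (objective: simpler).


-- ===== PORT A =====
-- the while loop: `while num > 0 and s < 5: num = int(num / 10); s += 1`.
-- In the loop num > 0, so Python's int(num/10) truncation equals floor division
-- (and the float quotient is exactly rounded for the magnitudes in Dom), ported as floordiv.
def symLoop (num s : Int) : Int :=
  if num > 0 ∧ s < 5 then symLoop (PySem.Int.floordiv num 10) (s + 1) else s
termination_by (5 - s).toNat
decreasing_by omega

def sym_in_num (num : Int) : Int :=
  let n := num
  let num1 := if num < 0 then num * (-1) else num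
  let s := symLoop num1 0
  if n < 0 then s + 1 else s

-- ===== PORT B =====
def sym_in_num_alt (num : Int) : Int :=
  let a := |num|
  let s := ([0, 9, 99, 999, 9999] : List Int).foldl
    (fun acc t => acc + (if a > t then 1 else 0)) 0
  s + (if num < 0 then 1 else 0)

-- ===== PRECONDITION & SPEC =====
def Spec_sym_in_num (num : Int) (out : Int) : Prop := out = sym_in_num_alt num
instance (num : Int) (out : Int) : Decidable (Spec_sym_in_num num out) := by unfold Spec_sym_in_num; infer_instance

-- ===== CLAIM (what is proved, stated in full; the proofs are below) =====
def Claim_equal_sym_in_num : Prop := ∀ (num : Int), Dom_sym_in_num num → Spec_sym_in_num num (sym_in_num num)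

-- ===== LEMMAS AND PROOFS =====
theorem fdiv10 (x : Int) : Int.fdiv x 10 = x / 10 := by
  rw [Int.fdiv_eq_ediv]; simp

theorem symLoop_step (x s t : Int) (h : 0 < x) (hs : s < 5) (ht : t = s + 1) :
    symLoop x s = symLoop (Int.fdiv x 10) t := by
  rw [symLoop, ht]; simp [PySem.Int.floordiv, h, hs]

theorem symLoop_done (x s : Int) (h : ¬(x > 0 ∧ s < 5)) : symLoop x s = s := by
  rw [symLoop]; simp only [if_neg h]

theorem symLoop_eval (x : Int) (hx : 0 ≤ x) :
    symLoop x 0 = (if x > 0 then (1:Int) else 0) + (if x > 9 then 1 else 0)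
      + (if x > 99 then 1 else 0) + (if x > 999 then 1 else 0)
      + (if x > 9999 then 1 else 0) := by
  by_cases h0 : x ≤ 0
  · rw [symLoop_done x 0 (by omega)]; split_ifs <;> omega
  by_cases h1 : x ≤ 9
  · rw [symLoop_step x 0 1 (by omega) (by omega) rfl]
    rw [symLoop_done _ 1 (by rw [fdiv10]; omega)]
    split_ifs <;> omega
  by_cases h2 : x ≤ 99
  · have b1 : 1 ≤ Int.fdiv x 10 ∧ Int.fdiv x 10 ≤ 9 := by rw [fdiv10]; omega
    rw [symLoop_step x 0 1 (by omega) (by omega) rfl]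
    rw [symLoop_step _ 1 2 (by omega) (by omega) rfl]
    rw [symLoop_done _ 2 (by rw [fdiv10, fdiv10]; omega)]
    split_ifs <;> omega
  by_cases h3 : x ≤ 999
  · have b1 : 10 ≤ Int.fdiv x 10 ∧ Int.fdiv x 10 ≤ 99 := by rw [fdiv10]; omega
    have b2 : 1 ≤ Int.fdiv (Int.fdiv x 10) 10 ∧ Int.fdiv (Int.fdiv x 10) 10 ≤ 9 := by
      rw [fdiv10, fdiv10]; omega
    rw [symLoop_step x 0 1 (by omega) (by omega) rfl]
    rw [symLoop_step _ 1 2 (by omega) (by omega) rfl]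
    rw [symLoop_step _ 2 3 (by omega) (by omega) rfl]
    rw [symLoop_done _ 3 (by rw [fdiv10, fdiv10, fdiv10]; omega)]
    split_ifs <;> omega
  by_cases h4 : x ≤ 9999
  · have b1 : 100 ≤ Int.fdiv x 10 ∧ Int.fdiv x 10 ≤ 999 := by rw [fdiv10]; omega
    have b2 : 10 ≤ Int.fdiv (Int.fdiv x 10) 10 ∧ Int.fdiv (Int.fdiv x 10) 10 ≤ 99 := by
      rw [fdiv10, fdiv10]; omega
    have b3 : 1 ≤ Int.fdiv (Int.fdiv (Int.fdiv x 10) 10) 10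
        ∧ Int.fdiv (Int.fdiv (Int.fdiv x 10) 10) 10 ≤ 9 := by
      rw [fdiv10, fdiv10, fdiv10]; omega
    rw [symLoop_step x 0 1 (by omega) (by omega) rfl]
    rw [symLoop_step _ 1 2 (by omega) (by omega) rfl]
    rw [symLoop_step _ 2 3 (by omega) (by omega) rfl]
    rw [symLoop_step _ 3 4 (by omega) (by omega) rfl]
    rw [symLoop_done _ 4 (by rw [fdiv10, fdiv10, fdiv10, fdiv10]; omega)]
    split_ifs <;> omega
  · have b1 : 1000 ≤ Int.fdiv x 10 := by rw [fdiv10]; omega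
    have b2 : 100 ≤ Int.fdiv (Int.fdiv x 10) 10 := by rw [fdiv10, fdiv10]; omega
    have b3 : 10 ≤ Int.fdiv (Int.fdiv (Int.fdiv x 10) 10) 10 := by
      rw [fdiv10, fdiv10, fdiv10]; omega
    have b4 : 1 ≤ Int.fdiv (Int.fdiv (Int.fdiv (Int.fdiv x 10) 10) 10) 10 := by
      rw [fdiv10, fdiv10, fdiv10, fdiv10]; omega
    rw [symLoop_step x 0 1 (by omega) (by omega) rfl]
    rw [symLoop_step _ 1 2 (by omega) (by omega) rfl]
    rw [symLoop_step _ 2 3 (by omega) (by omega) rfl]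
    rw [symLoop_step _ 3 4 (by omega) (by omega) rfl]
    rw [symLoop_step _ 4 5 (by omega) (by omega) rfl]
    rw [symLoop_done _ 5 (by omega)]
    split_ifs <;> omega

-- ===== VERDICT (by name: the statement is the Claim_ definition above) =====
theorem sym_in_num_spec : Claim_equal_sym_in_num := by
  intro num _
  unfold Spec_sym_in_num sym_in_num sym_in_num_alt
  simp only [List.foldl]
  by_cases hneg : num < 0
  · have habs : |num| = -num := abs_of_neg hneg
    have hm : num * (-1) = -num := by ring
    rw [if_pos hneg, if_pos hneg, hm, habs, symLoop_eval (-num) (by omega)]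
    split_ifs <;> omega
  · have habs : |num| = num := abs_of_nonneg (by omega)
    rw [if_neg hneg, if_neg hneg, habs, symLoop_eval num (by omega)]
    split_ifs <;> omega
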